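-- pv_equiv track=rewrite | github.com/cabalamat/arclike | grid.py | gFromStr
-- ===== SOURCE A (Python) =====
-- def gFromStr(s: str) -> list[list[int]]:
--     """ create the internals of a grid from a line-string,
--     e.g. "12/34" -> [[1,2], [3,4]]
--
--     digits go to that digit, "/" means new row
--     "." means 0, anything else is undefined.
--     """
--     result = []
--     row = []
--     for ch in s:
--         if ch==".": ch = "0"
--         if ch in "0123456789":
--             d = int(ch)
--             row.append(d)
--         elif ch=="/":
--             result.append(row)
--             row = []
--     #//for
--     if row:
--         result.append(row)
--     return result
-- ===== SOURCE B (Python) =====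
-- def gFromStr(s: str) -> list[list[int]]:
--     result = [[0 if ch == '.' else int(ch) for ch in seg if ch in '.0123456789']
--               for seg in s.split('/')]
--     if result and not result[-1]:
--         result.pop()
--     return result
-- ===== Notes on version B (the rewrite author's own statement) =====
-- stated objective: simpler
-- what changed: A's single-pass character state machine (mutable result/row accumulators with explicit slash and digit branching) is replaced by split on the separator plus a per-segment comprehension, followed by dropping only a trailing empty row.
import Mathlib
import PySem

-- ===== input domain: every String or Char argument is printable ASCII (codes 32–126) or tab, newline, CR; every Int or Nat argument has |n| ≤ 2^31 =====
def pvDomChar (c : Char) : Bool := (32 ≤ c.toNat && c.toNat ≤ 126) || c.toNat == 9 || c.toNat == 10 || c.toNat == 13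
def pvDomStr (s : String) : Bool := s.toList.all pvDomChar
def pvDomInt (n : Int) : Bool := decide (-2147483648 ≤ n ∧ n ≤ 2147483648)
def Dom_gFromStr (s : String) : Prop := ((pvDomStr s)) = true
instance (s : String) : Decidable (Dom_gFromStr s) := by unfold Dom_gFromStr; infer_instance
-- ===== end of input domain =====

-- B replaces A's character-by-character state machine by split-on-'/' plus a per-segment
-- comprehension that drops only a trailing empty row (objective: simpler decomposition).

-- int(ch) as both Pythons call it, on a character that is a decimal digit at the call site (exact there)
def pvDigitVal (ch : Char) : Int := (ch.toNat : Int) - 48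

-- ===== PORT A =====
-- the body of A's for-loop; state = (result, row)
def pvStepA (st : List (List Int) × List Int) (ch : Char) : List (List Int) × List Int :=
  let ch := if ch = '.' then '0' else ch
  if PySem.Chars.isIn [ch] "0123456789".toList then
    (st.1, st.2 ++ [pvDigitVal ch])
  else if ch = '/' then (st.1 ++ [st.2], [])
  else st

def gFromStr (s : String) : List (List Int) :=
  let st := s.toList.foldl pvStepA ([], [])
  if st.2 ≠ [] then st.1 ++ [st.2] else st.1

-- ===== PORT B =====
-- [0 if ch == '.' else int(ch) for ch in seg if ch in '.0123456789']
def pvRowOf (seg : List Char) : List Int :=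
  (seg.filter (fun ch => PySem.Chars.isIn [ch] ".0123456789".toList)).map
    (fun ch => if ch = '.' then 0 else pvDigitVal ch)

def gFromStr_alt (s : String) : List (List Int) :=
  let result := (PySem.Chars.splitOn s.toList ['/']).map pvRowOf
  match result.getLast? with          -- if result and not result[-1]: result.pop()
  | some [] => result.dropLast
  | _ => result

-- ===== PRECONDITION & SPEC =====
def Spec_gFromStr (s : String) (out : List (List Int)) : Prop := out = gFromStr_alt s
instance (s : String) (out : List (List Int)) : Decidable (Spec_gFromStr s out) := by unfold Spec_gFromStr; infer_instance

-- ===== CLAIM (what is proved, stated in full; the proofs are below) =====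
def Claim_equal_gFromStr : Prop := ∀ (s : String), Dom_gFromStr s → Spec_gFromStr s (gFromStr s)

-- ===== LEMMAS AND PROOFS =====

-- structural recursion computing PySem.Chars.splitOn · [c]
def pvSplit (cs : List Char) (c : Char) : List (List Char) :=
  match cs with
  | [] => [[]]
  | a :: rest => if a = c then [] :: pvSplit rest c else (pvSplit rest c).modifyHead (a :: ·)

-- B's trailing-empty-row drop, as a named function of the row list
def pvDropTrail (rows : List (List Int)) : List (List Int) :=
  match rows.getLast? with
  | some [] => rows.dropLast
  | _ => rows

-- `ch in "…"` on a single character is list membership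
theorem pv_isIn_singleton (c : Char) (ds : List Char) :
    PySem.Chars.isIn [c] ds = ds.contains c := by
  rw [Bool.eq_iff_iff, PySem.Chars.isIn_iff_infix, List.contains_iff_mem]
  exact ⟨fun h => List.singleton_sublist.mp h.sublist,
    fun h => List.infix_iff_prefix_suffix.mpr (by
      obtain ⟨a, b, rfl⟩ := List.append_of_mem h
      exact ⟨[c] ++ b, by simp, by simp⟩)⟩

theorem pvSplit_ne_nil (cs : List Char) (c : Char) : pvSplit cs c ≠ [] := by
  cases cs with
  | nil => simp [pvSplit]
  | cons a rest =>
      simp only [pvSplit]; split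
      · simp
      · intro h
        exact pvSplit_ne_nil rest c (by simpa using congrArg List.length h)

theorem pv_go_spec (c : Char) (l cur : List Char) (acc : List (List Char)) (fuel : Nat)
    (h : l.length ≤ fuel) :
    PySem.Chars.splitOn.go [c] fuel l cur acc
      = acc.reverse ++ (pvSplit l c).modifyHead (cur.reverse ++ ·) := by
  induction l generalizing fuel cur acc with
  | nil => cases fuel <;> simp [PySem.Chars.splitOn.go, pvSplit]
  | cons a rest ih =>
      cases fuel with
      | zero => simp at h
      | succ n =>
        rw [PySem.Chars.splitOn.go]
        have hn : rest.length ≤ n := by simpa using h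
        obtain ⟨p, ps, hs⟩ := List.exists_cons_of_ne_nil (pvSplit_ne_nil rest c)
        by_cases hac : a = c
        · rw [if_pos (by simp [List.isPrefixOf, hac])]
          simp only [List.length_singleton, List.drop_succ_cons, List.drop_zero]
          rw [ih [] (cur.reverse :: acc) n hn]
          simp [pvSplit, hac, hs]
        · rw [if_neg (by simp [List.isPrefixOf]; exact fun hca => absurd hca.symm hac)]
          rw [ih (a :: cur) acc n hn]
          simp [pvSplit, hac, hs]

theorem pv_splitOn_eq (cs : List Char) (c : Char) :
    PySem.Chars.splitOn cs [c] = pvSplit cs c := by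
  rw [PySem.Chars.splitOn, pv_go_spec c cs [] [] (cs.length + 1) (by omega)]
  obtain ⟨p, ps, hs⟩ := List.exists_cons_of_ne_nil (pvSplit_ne_nil cs c)
  simp [hs]

theorem pvDropTrail_cons (r : List Int) (ts : List (List Int)) (h : ts ≠ []) :
    pvDropTrail (r :: ts) = r :: pvDropTrail ts := by
  obtain ⟨t, ts', rfl⟩ := List.exists_cons_of_ne_nil h
  simp only [pvDropTrail, List.getLast?_cons_cons]
  split <;> simp_all

theorem pv_key (cs : List Char) (res : List (List Int)) (row : List Int) :
    (let st := cs.foldl pvStepA (res, row)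
     if st.2 ≠ [] then st.1 ++ [st.2] else st.1)
      = res ++ pvDropTrail (((pvSplit cs '/').map pvRowOf).modifyHead (row ++ ·)) := by
  induction cs generalizing res row with
  | nil =>
      by_cases hr : row = [] <;>
        simp [pvSplit, pvRowOf, pvDropTrail, hr]
  | cons ch rest ih =>
      obtain ⟨p, ps, hs⟩ := List.exists_cons_of_ne_nil (pvSplit_ne_nil rest '/')
      simp only [List.foldl_cons]
      by_cases hsl : ch = '/'
      · subst hsl
        have hstep : pvStepA (res, row) '/' = (res ++ [row], []) := by
          simp [pvStepA, pv_isIn_singleton]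
        rw [hstep, ih, hs]
        rw [show pvSplit ('/' :: rest) '/' = [] :: pvSplit rest '/' from by simp [pvSplit]]
        rw [hs]
        simp only [List.map_cons, List.modifyHead_cons, show pvRowOf [] = [] from rfl,
          List.append_nil, List.nil_append]
        rw [pvDropTrail_cons row (pvRowOf p :: List.map pvRowOf ps) (by simp)]
        simp
      · have hsplit : pvSplit (ch :: rest) '/' = (p :: ps).modifyHead (ch :: ·) := by
          simp [pvSplit, hsl, hs]
        by_cases hdot : ch = '.'
        · subst hdot
          have hstep : pvStepA (res, row) '.' = (res, row ++ [(0:Int)]) := by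
            simp [pvStepA, pv_isIn_singleton, pvDigitVal]
          have hrow : pvRowOf ('.' :: p) = 0 :: pvRowOf p := by
            simp [pvRowOf, pv_isIn_singleton]
          rw [hstep, ih, hs, hsplit]
          simp only [List.modifyHead_cons, List.map_cons, hrow]
          simp
        · by_cases hd : ch ∈ "0123456789".toList
          · have hc : PySem.Chars.isIn [ch] ['0','1','2','3','4','5','6','7','8','9'] = true := by
              rw [pv_isIn_singleton]
              simpa using hd
            have hc2 : PySem.Chars.isIn [ch] ['.','0','1','2','3','4','5','6','7','8','9'] = true := by
              rw [pv_isIn_singleton]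
              have : ch ∈ ['.','0','1','2','3','4','5','6','7','8','9'] := List.mem_cons_of_mem '.' (by simpa using hd)
              simpa using this
            have hstep : pvStepA (res, row) ch = (res, row ++ [pvDigitVal ch]) := by
              simp [pvStepA, hdot, hc]
            have hrow : pvRowOf (ch :: p) = pvDigitVal ch :: pvRowOf p := by
              simp [pvRowOf, hc2, hdot]
            rw [hstep, ih, hs, hsplit]
            simp only [List.modifyHead_cons, List.map_cons, hrow]
            simp
          · have hc : PySem.Chars.isIn [ch] ['0','1','2','3','4','5','6','7','8','9'] = false := by
              rw [pv_isIn_singleton]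
              simpa using hd
            have hc2 : PySem.Chars.isIn [ch] ['.','0','1','2','3','4','5','6','7','8','9'] = false := by
              rw [pv_isIn_singleton]
              simp only [List.contains_eq_mem, decide_eq_false_iff_not]
              intro hmem
              rcases List.mem_cons.mp hmem with h1 | h2
              · exact hdot h1
              · exact hd (by simpa using h2)
            have hstep : pvStepA (res, row) ch = (res, row) := by
              simp [pvStepA, hdot, hsl, hc]
            have hrow : pvRowOf (ch :: p) = pvRowOf p := by
              simp [pvRowOf, hc2]
            rw [hstep, ih, hs, hsplit]
            simp only [List.modifyHead_cons, List.map_cons, hrow]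


-- ===== VERDICT (by name: the statement is the Claim_ definition above) =====
theorem gFromStr_spec : Claim_equal_gFromStr := by
  intro s _
  show gFromStr s = gFromStr_alt s
  rw [gFromStr, gFromStr_alt, pv_splitOn_eq, pv_key s.toList [] []]
  obtain ⟨p, ps, hs⟩ := List.exists_cons_of_ne_nil (pvSplit_ne_nil s.toList '/')
  rw [hs]
  simp only [List.map_cons, List.modifyHead_cons, List.nil_append]
  rfl
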